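-- pv_equiv track=rewrite | github.com/Raevsk1i/grafana_exporter | utils/confluence_graphics_sorter.py | sort_graphics_by_order
-- ===== SOURCE A (Python) =====
-- from typing import List, Dict, Tuple
--
-- ALL_METRICS_ORDER = [
--     'cpu-usage-percent', 'cpu-usage-limit-(millicores)', 'cpu-throttled-(millicores)',
--     'ram-usage-percent', 'ram-usage-limit-(bytes)', 'disk-total-avail-used-(bytes)',
--     'disk-read-write-(bytes)', 'disk-read-write-(ops)', 'traffic-in-out-(bytes)',
--     'heap-(bytes)', 'heap-per-pool-(bytes)', 'nonHeap-per-pool-(bytes)',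
--     'metaspace-(bytes)', 'gc-collection-count-time', 'threads-count'
-- ]
--
-- def sort_graphics_by_order(graphics: Dict[str, str]) -> List[Tuple[str, str]]:
--     """Sorts graphics by predefined order (utility)."""
--     sorted_graphics = []
--     remaining_graphics = list(graphics.items())
--     for metric_name in ALL_METRICS_ORDER:
--         matched_graphics = [(panel_name, path) for panel_name, path in remaining_graphics if metric_name in panel_name.lower()]
--         sorted_graphics.extend(matched_graphics)
--         for graphic in matched_graphics:
--             if graphic in remaining_graphics:
--                 remaining_graphics.remove(graphic)
--     remaining_graphics.sort(key=lambda x: x[0].lower())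
--     sorted_graphics.extend(remaining_graphics)
--     return sorted_graphics
-- ===== SOURCE B (Python) =====
-- from typing import List, Dict, Tuple
--
-- ALL_METRICS_ORDER = [
--     'cpu-usage-percent', 'cpu-usage-limit-(millicores)', 'cpu-throttled-(millicores)',
--     'ram-usage-percent', 'ram-usage-limit-(bytes)', 'disk-total-avail-used-(bytes)',
--     'disk-read-write-(bytes)', 'disk-read-write-(ops)', 'traffic-in-out-(bytes)',
--     'heap-(bytes)', 'heap-per-pool-(bytes)', 'nonHeap-per-pool-(bytes)',
--     'metaspace-(bytes)', 'gc-collection-count-time', 'threads-count'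
-- ]
--
-- def sort_graphics_by_order(graphics: Dict[str, str]) -> List[Tuple[str, str]]:
--     """Single pass: drop each panel into the bucket of its first matching metric
--     (or into 'unmatched'), then concatenate the buckets and the sorted unmatched."""
--     buckets = [[] for _ in ALL_METRICS_ORDER]
--     unmatched = []
--     for name, path in graphics.items():
--         low = name.lower()
--         for i, metric in enumerate(ALL_METRICS_ORDER):
--             if metric in low:
--                 buckets[i].append((name, path))
--                 break
--         else:
--             unmatched.append((name, path))
--     result = [g for bucket in buckets for g in bucket]
--     result.extend(sorted(unmatched, key=lambda x: x[0].lower()))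
--     return result
-- ===== Notes on version B (the rewrite author's own statement) =====
-- stated objective: alternative
-- what changed: Replaces the per-metric rescan of the shrinking 'remaining' list (filter + membership test + remove per matched panel) by a single pass over the panels that drops each one into the bucket of its first matching metric, then concatenates the buckets and the sorted unmatched rest.
import Mathlib
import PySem

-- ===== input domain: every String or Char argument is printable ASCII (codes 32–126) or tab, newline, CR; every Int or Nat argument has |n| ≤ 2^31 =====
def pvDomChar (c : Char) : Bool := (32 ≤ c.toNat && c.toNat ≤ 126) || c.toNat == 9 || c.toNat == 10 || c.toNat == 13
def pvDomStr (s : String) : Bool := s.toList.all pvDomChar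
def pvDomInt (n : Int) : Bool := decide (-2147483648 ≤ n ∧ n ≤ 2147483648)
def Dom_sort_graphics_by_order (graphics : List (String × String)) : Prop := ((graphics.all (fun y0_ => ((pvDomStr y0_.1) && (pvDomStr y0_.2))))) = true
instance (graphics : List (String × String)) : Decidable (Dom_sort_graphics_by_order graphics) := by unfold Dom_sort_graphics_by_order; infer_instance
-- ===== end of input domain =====

-- B replaces A's repeated filter/membership/remove passes over the shrinking 'remaining' list
-- by a single bucketing pass over the panels (an alternative algorithm, same return value).

def allMetricsOrder : List String :=
  ["cpu-usage-percent", "cpu-usage-limit-(millicores)", "cpu-throttled-(millicores)",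
   "ram-usage-percent", "ram-usage-limit-(bytes)", "disk-total-avail-used-(bytes)",
   "disk-read-write-(bytes)", "disk-read-write-(ops)", "traffic-in-out-(bytes)",
   "heap-(bytes)", "heap-per-pool-(bytes)", "nonHeap-per-pool-(bytes)",
   "metaspace-(bytes)", "gc-collection-count-time", "threads-count"]

-- ===== PORT A =====
-- one iteration of A's 'for metric_name in ALL_METRICS_ORDER' loop over the state (sorted_graphics, remaining_graphics)
def aStep (st : List (String × String) × List (String × String)) (metric : String) :
    List (String × String) × List (String × String) :=
  let matched := st.2.filter (fun g => PySem.Str.isIn metric (PySem.Str.lower g.1))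
  let sorted := st.1 ++ matched
  let remaining := matched.foldl
    (fun r g => if g ∈ r then (PySem.List.remove? r g).getD r else r) st.2
  (sorted, remaining)

def sort_graphics_by_order (graphics : List (String × String)) : List (String × String) :=
  (allMetricsOrder.foldl aStep ([], graphics)).1
    ++ PySem.List.sorted (allMetricsOrder.foldl aStep ([], graphics)).2
        (fun x => PySem.Str.lower x.1) false

-- ===== PORT B =====
-- B's inner 'for i, metric in enumerate(...): ... break / else' search for the first matching metric
def findGroup (low : String) : List String → Nat → Option Nat
  | [], _ => none
  | m :: ms, i => if PySem.Str.isIn m low then some i else findGroup low ms (i + 1)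

-- one step of B's single pass over the panels; state = (buckets, unmatched)
def bStep (st : List (List (String × String)) × List (String × String)) (g : String × String) :
    List (List (String × String)) × List (String × String) :=
  match findGroup (PySem.Str.lower g.1) allMetricsOrder 0 with
  | some i => (st.1.set i (st.1[i]! ++ [g]), st.2)
  | none => (st.1, st.2 ++ [g])

def sort_graphics_by_order_alt (graphics : List (String × String)) : List (String × String) :=
  (graphics.foldl bStep (List.replicate allMetricsOrder.length [], [])).1.flatten
    ++ PySem.List.sorted (graphics.foldl bStep (List.replicate allMetricsOrder.length [], [])).2
        (fun x => PySem.Str.lower x.1) false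


-- ===== PRECONDITION & SPEC =====
def Spec_sort_graphics_by_order (graphics : List (String × String)) (out : List (String × String)) : Prop := out = sort_graphics_by_order_alt graphics
instance (graphics : List (String × String)) (out : List (String × String)) : Decidable (Spec_sort_graphics_by_order graphics out) := by unfold Spec_sort_graphics_by_order; infer_instance

-- ===== CLAIM (what is proved, stated in full; the proofs are below) =====
def Claim_equal_sort_graphics_by_order : Prop := ∀ (graphics : List (String × String)), Dom_sort_graphics_by_order graphics → Spec_sort_graphics_by_order graphics (sort_graphics_by_order graphics)

-- ===== LEMMAS AND PROOFS =====


def pMatch (m : String) (g : String × String) : Bool := PySem.Str.isIn m (PySem.Str.lower g.1)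

def parts : List String → List (String × String) → List (String × String)
  | [], _ => []
  | m :: ms, L => L.filter (pMatch m) ++ parts ms (L.filter (fun g => !pMatch m g))

lemma foldRem_cons_of_ne {α : Type} [DecidableEq α] [BEq α] [LawfulBEq α] (es : List α) (x : α) (t : List α)
    (h : ∀ e ∈ es, e ≠ x) :
    es.foldl (fun r g => if g ∈ r then (PySem.List.remove? r g).getD r else r) (x :: t)
      = x :: es.foldl (fun r g => if g ∈ r then (PySem.List.remove? r g).getD r else r) t := by
  induction es generalizing t with
  | nil => rfl
  | cons e es ih =>
    have hne : e ≠ x := h e (by simp)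
    simp only [List.foldl_cons]
    rw [show (if e ∈ x :: t then ((PySem.List.remove? (x :: t) e).getD (x :: t)) else x :: t)
        = x :: (if e ∈ t then (PySem.List.remove? t e).getD t else t) from ?_]
    · exact ih _ (fun a ha => h a (by simp [ha]))
    · by_cases he : e ∈ t
      · simp [List.mem_cons, he, PySem.List.remove?_cons_of_ne _ (Ne.symm hne),
          PySem.List.remove?_eq_some_erase _ _ he]
      · simp [List.mem_cons, he, fun h' => hne h']

lemma foldRem_filter {α : Type} [DecidableEq α] [BEq α] [LawfulBEq α] (p : α → Bool) (L : List α) :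
    (L.filter p).foldl (fun r g => if g ∈ r then (PySem.List.remove? r g).getD r else r) L
      = L.filter (fun x => !p x) := by
  induction L with
  | nil => rfl
  | cons x t ih =>
    by_cases hx : p x
    · simp only [List.filter_cons, hx, if_pos, List.foldl_cons, List.mem_cons]
      simp only [PySem.List.remove?_cons_self, Option.getD_some]
      simpa [hx] using ih
    · have hfil : (x :: t).filter p = t.filter p := by simp [List.filter_cons, hx]
      rw [hfil, foldRem_cons_of_ne _ _ _ (fun e he => by
        intro hex; subst hex; exact hx (List.of_mem_filter he))]
      simp [hx, ih]

lemma aLoop (ms : List String) (acc L : List (String × String)) :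
    ms.foldl aStep (acc, L)
      = (acc ++ parts ms L, L.filter (fun g => ms.all (fun m => !pMatch m g))) := by
  induction ms generalizing acc L with
  | nil => simp [parts]
  | cons m ms ih =>
    have hstep : aStep (acc, L) m
        = (acc ++ L.filter (pMatch m), L.filter (fun g => !pMatch m g)) := by
      simp only [aStep, pMatch]
      exact congrArg _ (foldRem_filter _ _)
    simp only [List.foldl_cons, hstep, ih, parts, List.append_assoc]
    rw [Prod.mk.injEq]
    refine ⟨rfl, ?_⟩
    rw [List.filter_filter]
    apply List.filter_congr
    intro g _
    simp [List.all_cons, Bool.and_comm]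

lemma findGroup_none_iff (low : String) (ms : List String) (k : Nat) :
    findGroup low ms k = none ↔ ms.all (fun m => !PySem.Str.isIn m low) := by
  induction ms generalizing k with
  | nil => simp [findGroup]
  | cons m ms ih =>
    by_cases h : PySem.Chars.isIn m.toList low.toList = true
    · simp [findGroup, PySem.Str.isIn, h]
    · simp [findGroup, PySem.Str.isIn, h, ih]

lemma findGroup_shift (low : String) (ms : List String) (k : Nat) :
    findGroup low ms k = (findGroup low ms 0).map (fun j => j + k) := by
  induction ms generalizing k with
  | nil => simp [findGroup]
  | cons m ms ih =>
    by_cases h : PySem.Chars.isIn m.toList low.toList = true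
    · simp [findGroup, PySem.Str.isIn, h]
    · have e1 : findGroup low (m :: ms) k = findGroup low ms (k + 1) := by
        simp [findGroup, PySem.Str.isIn, h]
      have e0 : findGroup low (m :: ms) 0 = findGroup low ms 1 := by
        simp [findGroup, PySem.Str.isIn, h]
      rw [e1, e0, ih (k + 1), ih 1]
      cases findGroup low ms 0 <;> simp <;> omega

lemma findGroup_lt (low : String) (ms : List String) (k i : Nat)
    (h : findGroup low ms k = some i) : i < k + ms.length := by
  induction ms generalizing k with
  | nil => simp [findGroup] at h
  | cons m ms ih =>
    by_cases hm : PySem.Chars.isIn m.toList low.toList = true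
    · simp [findGroup, PySem.Str.isIn, hm] at h
      simp only [List.length_cons]; omega
    · simp only [findGroup, PySem.Str.isIn, hm, if_false] at h
      have := ih (k + 1) h
      simp only [List.length_cons]; omega

def fm (g : String × String) : Option Nat := findGroup (PySem.Str.lower g.1) allMetricsOrder 0

lemma bLoop (L : List (String × String)) (bs : List (List (String × String)))
    (u : List (String × String)) (hlen : bs.length = allMetricsOrder.length) :
    (L.foldl bStep (bs, u)).1.length = allMetricsOrder.length
    ∧ (∀ i (hi : i < allMetricsOrder.length),
        (L.foldl bStep (bs, u)).1[i]? = some (bs[i]'(by omega) ++ L.filter (fun g => fm g = some i)))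
    ∧ (L.foldl bStep (bs, u)).2 = u ++ L.filter (fun g => fm g = none) := by
  induction L generalizing bs u with
  | nil => refine ⟨by simpa using hlen, ?_, by simp⟩
           intro i hi
           simp [List.getElem?_eq_getElem (by omega : i < bs.length)]
  | cons g L ih =>
    cases hg : fm g with
    | none =>
      have hstep : bStep (bs, u) g = (bs, u ++ [g]) := by
        simp [bStep, show findGroup (PySem.Str.lower g.1) allMetricsOrder 0 = none from hg]
      obtain ⟨h1, h2, h3⟩ := ih bs (u ++ [g]) hlen
      refine ⟨by simpa [hstep] using h1, ?_, ?_⟩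
      · intro i hi
        have := h2 i hi
        simpa [hstep, List.filter_cons, hg] using this
      · simp only [List.foldl_cons, hstep, h3, List.filter_cons, hg]
        simp
    | some j =>
      have hj : j < allMetricsOrder.length := by
        have := findGroup_lt _ _ _ _ hg
        omega
      have hjbs : j < bs.length := by omega
      have hgetbang : bs[j]! = bs[j]'hjbs := getElem!_pos bs j hjbs
      have hstep : bStep (bs, u) g = (bs.set j (bs[j]'hjbs ++ [g]), u) := by
        simp [bStep, show findGroup (PySem.Str.lower g.1) allMetricsOrder 0 = some j from hg, hgetbang]
      have hlen' : (bs.set j (bs[j]'hjbs ++ [g])).length = allMetricsOrder.length := by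
        simpa using hlen
      obtain ⟨h1, h2, h3⟩ := ih (bs.set j (bs[j]'hjbs ++ [g])) u hlen'
      refine ⟨by simpa [hstep] using h1, ?_, ?_⟩
      · intro i hi
        have := h2 i hi
        by_cases hij : i = j
        · subst hij
          simpa [hstep, List.filter_cons, hg, List.getElem_set] using this
        · rw [List.foldl_cons, hstep]
          rw [this]
          congr 1
          rw [List.getElem_set]
          simp [List.filter_cons, hg, show j ≠ i from fun h => hij h.symm]
      · simp only [List.foldl_cons, hstep, h3, List.filter_cons, hg]
        simp

lemma filter_fg_zero (m : String) (ms : List String) (L : List (String × String)) :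
    L.filter (fun g => findGroup (PySem.Str.lower g.1) (m :: ms) 0 = some 0)
      = L.filter (pMatch m) := by
  apply List.filter_congr
  intro g _
  by_cases h : PySem.Chars.isIn m.toList (PySem.Chars.lower g.1.toList) = true
  · simp [findGroup, PySem.Str.isIn, pMatch, h]
  · have e0 : findGroup (PySem.Str.lower g.1) (m :: ms) 0
        = findGroup (PySem.Str.lower g.1) ms 1 := by
      simp [findGroup, PySem.Str.isIn, h]
    rw [e0, findGroup_shift]
    cases findGroup (PySem.Str.lower g.1) ms 0 <;> simp [pMatch, PySem.Str.isIn, h]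

lemma filter_fg_succ (m : String) (ms : List String) (L : List (String × String)) (i : Nat) :
    L.filter (fun g => findGroup (PySem.Str.lower g.1) (m :: ms) 0 = some (i + 1))
      = (L.filter (fun g => !pMatch m g)).filter
          (fun g => findGroup (PySem.Str.lower g.1) ms 0 = some i) := by
  rw [List.filter_filter]
  apply List.filter_congr
  intro g _
  by_cases h : PySem.Chars.isIn m.toList (PySem.Chars.lower g.1.toList) = true
  · simp [findGroup, PySem.Str.isIn, pMatch, h]
  · have e0 : findGroup (PySem.Str.lower g.1) (m :: ms) 0
        = findGroup (PySem.Str.lower g.1) ms 1 := by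
      simp [findGroup, PySem.Str.isIn, h]
    rw [e0, findGroup_shift]
    cases findGroup (PySem.Str.lower g.1) ms 0 <;>
      simp [pMatch, PySem.Str.isIn, h] <;> omega

lemma parts_eq (ms : List String) (L : List (String × String)) :
    parts ms L
      = ((List.range ms.length).map
          (fun i => L.filter (fun g => findGroup (PySem.Str.lower g.1) ms 0 = some i))).flatten := by
  induction ms generalizing L with
  | nil => simp [parts]
  | cons m ms ih =>
    simp only [parts, List.length_cons, List.range_succ_eq_map, List.map_cons, List.map_map,
      List.flatten_cons]
    congr 1
    · exact (filter_fg_zero m ms L).symm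
    · rw [ih]
      congr 1
      apply List.map_congr_left
      intro i _
      exact (filter_fg_succ m ms L i).symm

lemma residue_eq (L : List (String × String)) :
    L.filter (fun g => allMetricsOrder.all (fun m => !pMatch m g))
      = L.filter (fun g => fm g = none) := by
  apply List.filter_congr
  intro g _
  refine Bool.eq_iff_iff.mpr ?_
  simp [fm, findGroup_none_iff, pMatch, PySem.Str.isIn, List.all_eq_true]

lemma ab_eq (graphics : List (String × String)) :
    sort_graphics_by_order graphics = sort_graphics_by_order_alt graphics := by
  unfold sort_graphics_by_order sort_graphics_by_order_alt
  obtain ⟨h1, h2, h3⟩ := bLoop graphics (List.replicate allMetricsOrder.length []) []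
    (List.length_replicate)
  have hA := aLoop allMetricsOrder [] graphics
  rw [hA]
  have hbs : (graphics.foldl bStep (List.replicate allMetricsOrder.length [], [])).1
      = (List.range allMetricsOrder.length).map
          (fun i => graphics.filter (fun g => fm g = some i)) := by
    apply List.ext_getElem?
    intro i
    by_cases hi : i < allMetricsOrder.length
    · rw [h2 i hi]
      simp [hi]
    · have hle : allMetricsOrder.length ≤ i := by omega
      rw [List.getElem?_eq_none (by rw [h1]; exact hle),
          List.getElem?_eq_none (by simpa using hle)]
  rw [hbs, h3, residue_eq]
  simp only [List.nil_append, parts_eq]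
  rfl

-- ===== VERDICT (by name: the statement is the Claim_ definition above) =====
theorem sort_graphics_by_order_spec : Claim_equal_sort_graphics_by_order := by
  intro graphics _
  exact ab_eq graphics
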